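-- pv_equiv track=rewrite | github.com/PrathamsinhParmar/ASPES | backend/app/ai_engine/code_analyzer.py | _complexity_distribution
-- ===== SOURCE A (Python) =====
-- from typing import Any, Dict, List, Optional, Tuple
--
-- def _complexity_distribution(complexities: List[int]) -> Dict[str, int]:
--     """Radon risk bands: A(1-5), B(6-10), C(11-15), D(16-20), E(21-25), F(26+)."""
--     dist = {"A": 0, "B": 0, "C": 0, "D": 0, "E": 0, "F": 0}
--     for c in complexities:
--         if c <= 5:   dist["A"] += 1
--         elif c <= 10: dist["B"] += 1
--         elif c <= 15: dist["C"] += 1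
--         elif c <= 20: dist["D"] += 1
--         elif c <= 25: dist["E"] += 1
--         else:          dist["F"] += 1
--     return dist
-- ===== SOURCE B (Python) =====
-- def _complexity_distribution(complexities):
--     """Radon risk bands via cumulative threshold counts and their differences
--     instead of binning each element: count how many values are <= each band
--     boundary (staged passes), then band size = difference of neighbours."""
--     def at_most(t):
--         return sum(1 for c in complexities if c <= t)
--     a, b, c5, d, e = at_most(5), at_most(10), at_most(15), at_most(20), at_most(25)
--     n = len(complexities)
--     return {"A": a, "B": b - a, "C": c5 - b, "D": d - c5, "E": e - d, "F": n - e}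
-- ===== Notes on version B (the rewrite author's own statement) =====
-- stated objective: alternative
-- what changed: Instead of binning each element into one band in a single pass, B computes cumulative counts of elements below each band boundary (one counting pass per boundary) and obtains each band's count as the difference of adjacent cumulative counts.
import Mathlib
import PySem

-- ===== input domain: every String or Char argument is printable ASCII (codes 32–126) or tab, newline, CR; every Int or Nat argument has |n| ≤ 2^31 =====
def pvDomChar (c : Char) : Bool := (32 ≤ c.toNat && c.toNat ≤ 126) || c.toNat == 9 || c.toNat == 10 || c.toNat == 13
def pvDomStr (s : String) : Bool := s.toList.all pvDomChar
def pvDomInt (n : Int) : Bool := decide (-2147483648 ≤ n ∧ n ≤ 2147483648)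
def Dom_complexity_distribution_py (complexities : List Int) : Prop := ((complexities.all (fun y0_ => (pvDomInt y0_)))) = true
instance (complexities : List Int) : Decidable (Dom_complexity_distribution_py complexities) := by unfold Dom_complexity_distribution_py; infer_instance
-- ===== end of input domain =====

-- B replaces A's per-element if-elif binning with staged cumulative threshold counts
-- (how many values are ≤ each band boundary) and takes adjacent differences (objective: alternative).

-- ===== PORT A =====
-- loop body of A's for-loop: the if-elif cascade incrementing one dict entry
def pvStepA (d : PySem.Dict String Int) (c : Int) : PySem.Dict String Int :=
  if c ≤ 5 then d.modify "A" 0 (· + 1)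
  else if c ≤ 10 then d.modify "B" 0 (· + 1)
  else if c ≤ 15 then d.modify "C" 0 (· + 1)
  else if c ≤ 20 then d.modify "D" 0 (· + 1)
  else if c ≤ 25 then d.modify "E" 0 (· + 1)
  else d.modify "F" 0 (· + 1)

def complexity_distribution_py (complexities : List Int) : List (String × Int) :=
  (complexities.foldl pvStepA
    (PySem.Dict.ofList [("A", 0), ("B", 0), ("C", 0), ("D", 0), ("E", 0), ("F", 0)])).items

-- ===== PORT B =====
-- B's at_most(t): sum(1 for c in complexities if c <= t)
def pvAtMost (l : List Int) (t : Int) : Int :=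
  l.foldl (fun acc c => if c ≤ t then acc + 1 else acc) 0

def complexity_distribution_py_alt (complexities : List Int) : List (String × Int) :=
  let a := pvAtMost complexities 5
  let b := pvAtMost complexities 10
  let c5 := pvAtMost complexities 15
  let d := pvAtMost complexities 20
  let e := pvAtMost complexities 25
  let n : Int := complexities.length
  [("A", a), ("B", b - a), ("C", c5 - b), ("D", d - c5), ("E", e - d), ("F", n - e)]

-- ===== PRECONDITION & SPEC =====
def Spec_complexity_distribution_py (complexities : List Int) (out : List (String × Int)) : Prop := out = complexity_distribution_py_alt complexities
instance (complexities : List Int) (out : List (String × Int)) : Decidable (Spec_complexity_distribution_py complexities out) := by unfold Spec_complexity_distribution_py; infer_instance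

-- ===== CLAIM (what is proved, stated in full; the proofs are below) =====
def Claim_equal_complexity_distribution_py : Prop := ∀ (complexities : List Int), Dom_complexity_distribution_py complexities → Spec_complexity_distribution_py complexities (complexity_distribution_py complexities)

-- ===== LEMMAS AND PROOFS =====

-- A's loop, from an arbitrary six-entry dict state, adds to each entry the count of
-- elements falling in that band (proof-level characterisation of the cascade)
theorem pvFoldA (l : List Int) (a0 a1 a2 a3 a4 a5 : Int) :
    l.foldl pvStepA (PySem.Dict.mk [("A",a0),("B",a1),("C",a2),("D",a3),("E",a4),("F",a5)]) =
    PySem.Dict.mk [("A", a0 + (l.countP (fun c => decide (c ≤ 5)) : Int)),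
                   ("B", a1 + (l.countP (fun c => decide (5 < c ∧ c ≤ 10)) : Int)),
                   ("C", a2 + (l.countP (fun c => decide (10 < c ∧ c ≤ 15)) : Int)),
                   ("D", a3 + (l.countP (fun c => decide (15 < c ∧ c ≤ 20)) : Int)),
                   ("E", a4 + (l.countP (fun c => decide (20 < c ∧ c ≤ 25)) : Int)),
                   ("F", a5 + (l.countP (fun c => decide (25 < c)) : Int))] := by
  induction l generalizing a0 a1 a2 a3 a4 a5 with
  | nil => simp
  | cons c l ih =>
    rw [List.foldl_cons]
    by_cases h1 : c ≤ 5
    · rw [show pvStepA (PySem.Dict.mk [("A",a0),("B",a1),("C",a2),("D",a3),("E",a4),("F",a5)]) c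
          = PySem.Dict.mk [("A",a0+1),("B",a1),("C",a2),("D",a3),("E",a4),("F",a5)] from by
        simp only [pvStepA, if_pos h1]; rfl, ih]
      simp only [List.countP_cons, PySem.Dict.mk.injEq, List.cons.injEq, Prod.mk.injEq]
      and_intros <;> first | rfl | trivial |
        (split_ifs with h <;> simp only [decide_eq_true_eq] at h <;> push_cast <;> omega)
    · by_cases h2 : c ≤ 10
      · rw [show pvStepA (PySem.Dict.mk [("A",a0),("B",a1),("C",a2),("D",a3),("E",a4),("F",a5)]) c
            = PySem.Dict.mk [("A",a0),("B",a1+1),("C",a2),("D",a3),("E",a4),("F",a5)] from by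
          simp only [pvStepA, if_neg h1, if_pos h2]; rfl, ih]
        simp only [List.countP_cons, PySem.Dict.mk.injEq, List.cons.injEq, Prod.mk.injEq]
        and_intros <;> first | rfl | trivial |
          (split_ifs with h <;> simp only [decide_eq_true_eq] at h <;> push_cast <;> omega)
      · by_cases h3 : c ≤ 15
        · rw [show pvStepA (PySem.Dict.mk [("A",a0),("B",a1),("C",a2),("D",a3),("E",a4),("F",a5)]) c
              = PySem.Dict.mk [("A",a0),("B",a1),("C",a2+1),("D",a3),("E",a4),("F",a5)] from by
            simp only [pvStepA, if_neg h1, if_neg h2, if_pos h3]; rfl, ih]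
          simp only [List.countP_cons, PySem.Dict.mk.injEq, List.cons.injEq, Prod.mk.injEq]
          and_intros <;> first | rfl | trivial |
            (split_ifs with h <;> simp only [decide_eq_true_eq] at h <;> push_cast <;> omega)
        · by_cases h4 : c ≤ 20
          · rw [show pvStepA (PySem.Dict.mk [("A",a0),("B",a1),("C",a2),("D",a3),("E",a4),("F",a5)]) c
                = PySem.Dict.mk [("A",a0),("B",a1),("C",a2),("D",a3+1),("E",a4),("F",a5)] from by
              simp only [pvStepA, if_neg h1, if_neg h2, if_neg h3, if_pos h4]; rfl, ih]
            simp only [List.countP_cons, PySem.Dict.mk.injEq, List.cons.injEq, Prod.mk.injEq]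
            and_intros <;> first | rfl | trivial |
              (split_ifs with h <;> simp only [decide_eq_true_eq] at h <;> push_cast <;> omega)
          · by_cases h5 : c ≤ 25
            · rw [show pvStepA (PySem.Dict.mk [("A",a0),("B",a1),("C",a2),("D",a3),("E",a4),("F",a5)]) c
                  = PySem.Dict.mk [("A",a0),("B",a1),("C",a2),("D",a3),("E",a4+1),("F",a5)] from by
                simp only [pvStepA, if_neg h1, if_neg h2, if_neg h3, if_neg h4, if_pos h5]; rfl, ih]
              simp only [List.countP_cons, PySem.Dict.mk.injEq, List.cons.injEq, Prod.mk.injEq]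
              and_intros <;> first | rfl | trivial |
                (split_ifs with h <;> simp only [decide_eq_true_eq] at h <;> push_cast <;> omega)
            · rw [show pvStepA (PySem.Dict.mk [("A",a0),("B",a1),("C",a2),("D",a3),("E",a4),("F",a5)]) c
                  = PySem.Dict.mk [("A",a0),("B",a1),("C",a2),("D",a3),("E",a4),("F",a5+1)] from by
                simp only [pvStepA, if_neg h1, if_neg h2, if_neg h3, if_neg h4, if_neg h5]; rfl, ih]
              simp only [List.countP_cons, PySem.Dict.mk.injEq, List.cons.injEq, Prod.mk.injEq]
              and_intros <;> first | rfl | trivial |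
                (split_ifs with h <;> simp only [decide_eq_true_eq] at h <;> push_cast <;> omega)

-- B's counting fold equals countP (from any accumulator)
theorem pvAtMost_countP_aux (l : List Int) (t acc : Int) :
    l.foldl (fun acc c => if c ≤ t then acc + 1 else acc) acc
      = acc + (l.countP (fun c => decide (c ≤ t)) : Int) := by
  induction l generalizing acc with
  | nil => simp
  | cons c l ih =>
    rw [List.foldl_cons, List.countP_cons]
    by_cases h : c ≤ t
    · rw [if_pos h, ih, if_pos (by simpa using h)]
      push_cast; omega
    · rw [if_neg h, ih, if_neg (by simpa using h)]
      push_cast; omega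

theorem pvAtMost_countP (l : List Int) (t : Int) :
    pvAtMost l t = (l.countP (fun c => decide (c ≤ t)) : Int) := by
  simpa using pvAtMost_countP_aux l t 0

theorem pvCountP_split (l : List Int) (s t : Int) (hst : s ≤ t) :
    (l.countP (fun c => decide (c ≤ t)) : Int)
      = l.countP (fun c => decide (c ≤ s)) + l.countP (fun c => decide (s < c ∧ c ≤ t)) := by
  induction l with
  | nil => simp
  | cons c l ih =>
    simp only [List.countP_cons]
    split_ifs with h1 h2 h3 <;> simp_all <;> push_cast <;> omega

theorem pvCountP_top (l : List Int) :
    (l.countP (fun c => decide (25 < c)) : Int)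
      = (l.length : Int) - l.countP (fun c => decide (c ≤ 25)) := by
  induction l with
  | nil => simp
  | cons c l ih =>
    simp only [List.countP_cons, List.length_cons]
    split_ifs with h1 h2 <;> simp_all <;> push_cast <;> omega

-- ===== VERDICT (by name: the statement is the Claim_ definition above) =====
theorem complexity_distribution_py_spec : Claim_equal_complexity_distribution_py := by
  intro l _
  unfold Spec_complexity_distribution_py complexity_distribution_py complexity_distribution_py_alt
  rw [show PySem.Dict.ofList [("A", (0:Int)), ("B", 0), ("C", 0), ("D", 0), ("E", 0), ("F", 0)]
      = PySem.Dict.mk [("A", 0), ("B", 0), ("C", 0), ("D", 0), ("E", 0), ("F", 0)] from rfl,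
    pvFoldA]
  simp only [pvAtMost_countP, zero_add]
  have h1 := pvCountP_split l 5 10 (by norm_num)
  have h2 := pvCountP_split l 10 15 (by norm_num)
  have h3 := pvCountP_split l 15 20 (by norm_num)
  have h4 := pvCountP_split l 20 25 (by norm_num)
  have h5 := pvCountP_top l
  simp only [List.cons.injEq, Prod.mk.injEq]
  and_intros <;> first | trivial | omega
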